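-- pv_equiv track=rewrite | github.com/rastislavsvoboda/advent-of-code-2022 | aoc_2022_d22_b_p2_old.py | move1
-- ===== SOURCE A (Python) =====
-- def move1(G, R, C, r, c, d, i):
--     pos = r, c
--     while i > 0:
--         if d == 1:
--             r += 1
--             if (r, c) not in G:
--                 r = 0
--             while (r, c) not in G:
--                 r += 1
--             assert (r, c) in G
--             if G[(r, c)] == "#":
--                 break
--             pos = r, c
--         elif d == 3:
--             r -= 1
--             if (r, c) not in G:
--                 r = R
--             while (r, c) not in G:
--                 r -= 1
--             assert (r, c) in G
--             if G[(r, c)] == "#":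
--                 break
--             pos = r, c
--         elif d == 0:
--             c += 1
--             if (r, c) not in G:
--                 c = 0
--             while (r, c) not in G:
--                 c += 1
--             assert (r, c) in G
--             if G[(r, c)] == "#":
--                 break
--             pos = r, c
--         elif d == 2:
--             c -= 1
--             if (r, c) not in G:
--                 c = C
--             while (r, c) not in G:
--                 c -= 1
--             assert (r, c) in G
--             if G[(r, c)] == "#":
--                 break
--             pos = r, c
--         i -= 1
--     return pos
-- ===== SOURCE B (Python) =====
-- def _line_stop(S, walls, start, i):
--     """Stop coordinate after i forward steps on the cyclic line S (a set of ints),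
--     where one step goes to x+1 if present, else wraps to min(S); walls block."""
--     m = min(S)
--     t1 = start
--     while t1 + 1 in S:
--         t1 += 1
--     t2 = m
--     while t2 + 1 in S:
--         t2 += 1
--     L = t2 - m + 1
--     pre = t1 - start
--
--     def pos_at(k):
--         if k <= pre:
--             return start + k
--         return m + (k - pre - 1) % L
--
--     w = None
--     for k in range(1, pre + L + 1):
--         if pos_at(k) in walls:
--             w = k
--             break
--     k_eff = i if w is None else min(i, w - 1)
--     return pos_at(k_eff)
--
--
-- def move1(G, R, C, r, c, d, i):
--     if i <= 0 or d not in (0, 1, 2, 3):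
--         return (r, c)
--     sign = 1 if d in (0, 1) else -1
--     if d in (1, 3):
--         S = {rr * sign for (rr, cc) in G if cc == c}
--         walls = {rr * sign for (rr, cc) in G if cc == c and G[(rr, cc)] == "#"}
--         x = _line_stop(S, walls, r * sign, i) * sign
--         return (x, c)
--     else:
--         S = {cc * sign for (rr, cc) in G if rr == r}
--         walls = {cc * sign for (rr, cc) in G if rr == r and G[(rr, cc)] == "#"}
--         x = _line_stop(S, walls, c * sign, i) * sign
--         return (r, x)
-- ===== Notes on version B (the rewrite author's own statement) =====
-- stated objective: faster
-- what changed: A walks the grid one step at a time (i loop iterations, each with a linear wrap-scan for the next cell); B computes per call the travel line's contiguous-run end and wrap cycle once and returns the stop position in closed form: the first wall on the trajectory or a modular index into the cycle.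
-- outside the precondition, e.g. on move1({(1, 0): '.', (-2, 0): '.'}, 2, 2, 1, 0, 1, 1): A returns (1, 0), B returns (-2, 0); on move1({(5, 0): '.', (6, 0): '.'}, 2, 2, 5, 0, 1, 1): A returns (6, 0), B returns (6, 0)
import Mathlib
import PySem

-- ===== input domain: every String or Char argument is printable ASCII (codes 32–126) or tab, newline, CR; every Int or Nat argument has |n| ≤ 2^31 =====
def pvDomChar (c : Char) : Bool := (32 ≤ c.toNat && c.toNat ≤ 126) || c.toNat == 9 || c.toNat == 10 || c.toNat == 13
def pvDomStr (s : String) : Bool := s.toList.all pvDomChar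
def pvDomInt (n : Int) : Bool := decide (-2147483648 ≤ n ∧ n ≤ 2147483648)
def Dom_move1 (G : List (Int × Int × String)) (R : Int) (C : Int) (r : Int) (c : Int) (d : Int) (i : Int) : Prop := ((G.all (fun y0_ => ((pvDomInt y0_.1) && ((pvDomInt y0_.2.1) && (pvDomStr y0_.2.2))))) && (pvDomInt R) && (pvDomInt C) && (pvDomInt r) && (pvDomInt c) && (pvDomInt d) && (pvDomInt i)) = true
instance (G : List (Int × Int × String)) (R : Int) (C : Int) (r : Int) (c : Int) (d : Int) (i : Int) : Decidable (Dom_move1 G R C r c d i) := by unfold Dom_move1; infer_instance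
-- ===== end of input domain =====

set_option maxHeartbeats 1000000

-- B replaces A's step-by-step walk (one wrap-scan per step, i steps) by a once-per-call closed form over
-- the travel line (run ends, wrap cycle, first wall or modular index) — asymptotically faster in i.

-- ===== PORT A =====
-- dict lookup G[(a,b)] / '(a,b) in G' on the flattened association list (first match)
def pvGet? (G : List (Int × Int × String)) (a b : Int) : Option String :=
  match G with
  | [] => none
  | p :: t => if p.1 = a ∧ p.2.1 = b then some p.2.2 else pvGet? t a b

-- 'while (x,·) not in G: x += δ' — fueled for totality; under Pre_ the scan always stops inside the fuel
def pvScan (mem : Int → Bool) (δ : Int) : Nat → Int → Int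
  | 0, x => x
  | f+1, x => if mem x then x else pvScan mem δ f (x + δ)

-- A's 'while i > 0' loop, one constructor per iteration; the pair argument is A's `pos`
def move1Loop (G : List (Int × Int × String)) (R C : Int) (d : Int) :
    Nat → Int → Int → Int × Int → Int × Int
  | 0, _, _, pos => pos
  | f+1, r, c, pos =>
    if d = 1 then
      let r1 := r + 1
      let r2 := if (pvGet? G r1 c).isSome then r1 else 0
      let r3 := pvScan (fun x => (pvGet? G x c).isSome) 1 (R.toNat + 1) r2
      if pvGet? G r3 c = some "#" then pos
      else move1Loop G R C d f r3 c (r3, c)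
    else if d = 3 then
      let r1 := r - 1
      let r2 := if (pvGet? G r1 c).isSome then r1 else R
      let r3 := pvScan (fun x => (pvGet? G x c).isSome) (-1) (R.toNat + 1) r2
      if pvGet? G r3 c = some "#" then pos
      else move1Loop G R C d f r3 c (r3, c)
    else if d = 0 then
      let c1 := c + 1
      let c2 := if (pvGet? G r c1).isSome then c1 else 0
      let c3 := pvScan (fun x => (pvGet? G r x).isSome) 1 (C.toNat + 1) c2
      if pvGet? G r c3 = some "#" then pos
      else move1Loop G R C d f r c3 (r, c3)
    else if d = 2 then
      let c1 := c - 1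
      let c2 := if (pvGet? G r c1).isSome then c1 else C
      let c3 := pvScan (fun x => (pvGet? G r x).isSome) (-1) (C.toNat + 1) c2
      if pvGet? G r c3 = some "#" then pos
      else move1Loop G R C d f r c3 (r, c3)
    else move1Loop G R C d f r c pos

def move1 (G : List (Int × Int × String)) (R : Int) (C : Int) (r : Int) (c : Int) (d : Int) (i : Int) : Int × Int :=
  move1Loop G R C d i.toNat r c (r, c)

-- ===== PORT B =====
-- 'while t+1 in S: t += 1' of Source B — fueled; fuel = |S| always suffices (run elements are distinct members)
def pvRunTop (S : PySem.Set Int) : Nat → Int → Int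
  | 0, t => t
  | f+1, t => if PySem.Set.contains S (t+1) then pvRunTop S f (t+1) else t

-- Source B's pos_at(k)
def pvPosAt (start pre m L k : Int) : Int :=
  if k ≤ pre then start + k else m + PySem.Int.mod (k - pre - 1) L

-- Source B's _line_stop(S, walls, start, i); min(S) totalized with .getD 0 (S is nonempty under Pre_)
def pvLineCalc (S walls : PySem.Set Int) (start i : Int) : Int :=
  let m := (PySem.List.min? S (fun x => x)).getD 0
  let t1 := pvRunTop S S.length start
  let t2 := pvRunTop S S.length m
  let L := t2 - m + 1
  let pre := t1 - start
  let w := (PySem.List.pyRange 1 (pre + L + 1) 1).find?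
             (fun k => PySem.Set.contains walls (pvPosAt start pre m L k))
  let keff := match w with | none => i | some k => min i (k - 1)
  pvPosAt start pre m L keff

def move1_alt (G : List (Int × Int × String)) (R : Int) (C : Int) (r : Int) (c : Int) (d : Int) (i : Int) : Int × Int :=
  if i ≤ 0 ∨ (d ≠ 0 ∧ d ≠ 1 ∧ d ≠ 2 ∧ d ≠ 3) then (r, c)
  else
    let sign : Int := if d = 0 ∨ d = 1 then 1 else -1
    if d = 1 ∨ d = 3 then
      let S := PySem.Set.ofList ((G.filter (fun p => p.2.1 = c)).map (fun p => p.1 * sign))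
      let walls := PySem.Set.ofList
        ((G.filter (fun p => p.2.1 = c ∧ pvGet? G p.1 p.2.1 = some "#")).map (fun p => p.1 * sign))
      let x := pvLineCalc S walls (r * sign) i * sign
      (x, c)
    else
      let S := PySem.Set.ofList ((G.filter (fun p => p.1 = r)).map (fun p => p.2.1 * sign))
      let walls := PySem.Set.ofList
        ((G.filter (fun p => p.1 = r ∧ pvGet? G p.1 p.2.1 = some "#")).map (fun p => p.2.1 * sign))
      let x := pvLineCalc S walls (c * sign) i * sign
      (r, x)

-- ===== PRECONDITION & SPEC =====
-- Pre_ restricts, when a step is actually taken (i ≥ 1, valid d), to A's termination region and the grid's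
-- natural domain: the travel line (column c / row r) must have a cell on the wrap side (else A's wrap scan
-- diverges or exhausts the port's fuel), and all its coordinates must lie on the wrap-base side of the range
-- ([0,·) for forward moves, (·,R]/(·,C] for backward moves) — cells beyond it are outside the puzzle's grid,
-- and there A's wrap (first cell at/after the wrap base) is not the line extremum B uses.
def Pre_move1 (G : List (Int × Int × String)) (R : Int) (C : Int) (r : Int) (c : Int) (d : Int) (i : Int) : Prop :=
  1 ≤ i →
    ((d = 1 → (∀ p ∈ G, p.2.1 = c → 0 ≤ p.1) ∧ (∃ p ∈ G, p.2.1 = c ∧ p.1 ≤ R)) ∧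
     (d = 3 → (∀ p ∈ G, p.2.1 = c → p.1 ≤ R) ∧ (∃ p ∈ G, p.2.1 = c ∧ 0 ≤ p.1)) ∧
     (d = 0 → (∀ p ∈ G, p.1 = r → 0 ≤ p.2.1) ∧ (∃ p ∈ G, p.1 = r ∧ p.2.1 ≤ C)) ∧
     (d = 2 → (∀ p ∈ G, p.1 = r → p.2.1 ≤ C) ∧ (∃ p ∈ G, p.1 = r ∧ 0 ≤ p.2.1)))
instance (G : List (Int × Int × String)) (R : Int) (C : Int) (r : Int) (c : Int) (d : Int) (i : Int) : Decidable (Pre_move1 G R C r c d i) := by unfold Pre_move1; infer_instance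

def pvWitness_move1 : (List (Int × Int × String)) × Int × Int × Int × Int × Int × Int :=
  ([(0, 0, "."), (1, 0, "."), (2, 0, "#"), (0, 1, ".")], 2, 1, 0, 0, 1, 5)

def Spec_move1 (G : List (Int × Int × String)) (R : Int) (C : Int) (r : Int) (c : Int) (d : Int) (i : Int) (out : Int × Int) : Prop := out = move1_alt G R C r c d i
instance (G : List (Int × Int × String)) (R : Int) (C : Int) (r : Int) (c : Int) (d : Int) (i : Int) (out : Int × Int) : Decidable (Spec_move1 G R C r c d i out) := by unfold Spec_move1; infer_instance

-- ===== CLAIM (what is proved, stated in full; the proofs are below) =====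
def Claim_equal_move1 : Prop := ∀ (G : List (Int × Int × String)) (R : Int) (C : Int) (r : Int) (c : Int) (d : Int) (i : Int), Dom_move1 G R C r c d i → Pre_move1 G R C r c d i → Spec_move1 G R C r c d i (move1 G R C r c d i)

-- ===== LEMMAS AND PROOFS =====

-- abstract model of one A-step along the travel line: next coordinate if present, else the line's minimum
def gStep (mem : Int → Bool) (m x : Int) : Int := if mem (x+1) then x+1 else m

-- abstract model of A's outer loop (state = current coordinate; A's pos always equals it)
def loopG (mem wall : Int → Bool) (m : Int) : Nat → Int → Int
  | 0, x => x
  | f+1, x =>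
    if wall (gStep mem m x) then x else loopG mem wall m f (gStep mem m x)

theorem pvGet?_isSome_iff (G : List (Int × Int × String)) (a b : Int) :
    (pvGet? G a b).isSome = true ↔ ∃ p ∈ G, p.1 = a ∧ p.2.1 = b := by
  induction G with
  | nil => simp [pvGet?]
  | cons q t ih =>
    rw [pvGet?]
    by_cases h : q.1 = a ∧ q.2.1 = b
    · rw [if_pos h]
      simp only [Option.isSome_some, List.mem_cons]
      exact ⟨fun _ => ⟨q, Or.inl rfl, h⟩, fun _ => trivial⟩
    · rw [if_neg h, ih]
      simp only [List.mem_cons]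
      constructor
      · rintro ⟨p, hp, hpa⟩; exact ⟨p, Or.inr hp, hpa⟩
      · rintro ⟨p, hp | hp, hpa⟩
        · subst hp; exact absurd hpa h
        · exact ⟨p, hp, hpa⟩

theorem pvScan_up_eq (mem : Int → Bool) (f : Nat) (a y0 : Int)
    (hm : mem y0 = true) (hle : a ≤ y0) (hmin : ∀ y, a ≤ y → y < y0 → mem y = false)
    (hf : y0 - a ≤ (f : Int)) : pvScan mem 1 f a = y0 := by
  induction f generalizing a with
  | zero =>
    have ha : a = y0 := by omega
    subst ha; rfl
  | succ n ih =>
    rw [pvScan]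
    by_cases h : a = y0
    · subst h; rw [if_pos hm]
    · have hma : mem a = false := hmin a le_rfl (by omega)
      rw [if_neg (by simp [hma])]
      exact ih (a+1) (by omega) (fun y h1 h2 => hmin y (by omega) h2) (by omega)

theorem pvScan_neg (mem : Int → Bool) (f : Nat) (x : Int) :
    pvScan mem (-1) f x = -(pvScan (fun y => mem (-y)) 1 f (-x)) := by
  induction f generalizing x with
  | zero => simp [pvScan]
  | succ n ih =>
    rw [pvScan, pvScan]
    simp only [neg_neg]
    by_cases h : mem x
    · rw [if_pos h, if_pos h]; simp
    · rw [if_neg h, if_neg h]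
      rw [show x + -1 = x - 1 from by ring, show -x + 1 = -(x - 1) from by ring]
      exact ih (x - 1)

-- forward A-step: 'x+1; wrap to W; scan up' equals gStep with the line's minimum m
theorem stepA_fwd (mem : Int → Bool) (F : Nat) (W m x : Int)
    (hm : mem m = true) (hleast : ∀ y, mem y = true → m ≤ y)
    (hW : W ≤ m) (hf : m - W ≤ (F : Int)) :
    pvScan mem 1 F (if mem (x+1) then x+1 else W) = gStep mem m x := by
  unfold gStep
  by_cases h : mem (x+1)
  · rw [if_pos h, if_pos h]
    exact pvScan_up_eq mem F (x+1) (x+1) h le_rfl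
      (fun y h1 h2 => absurd h2 (by omega)) (by omega)
  · rw [if_neg h, if_neg h]
    refine pvScan_up_eq mem F W m hm hW ?_ hf
    intro y hy1 hy2
    cases hy : mem y with
    | false => rfl
    | true => exact absurd (hleast y hy) (by omega)

-- backward A-step via coordinate negation
theorem stepA_bwd (mem : Int → Bool) (F : Nat) (Rw m' x : Int)
    (hm : mem (-m') = true) (hleast : ∀ y, mem (-y) = true → m' ≤ y)
    (hW : -Rw ≤ m') (hf : m' - (-Rw) ≤ (F : Int)) :
    pvScan mem (-1) F (if mem (x-1) then x-1 else Rw) = -(gStep (fun y => mem (-y)) m' (-x)) := by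
  rw [pvScan_neg]
  congr 1
  have h1 : -(if mem (x-1) = true then x-1 else Rw)
      = (if (fun y => mem (-y)) (-x+1) = true then -x+1 else -Rw) := by
    simp only [show -x + 1 = -(x-1) from by ring, neg_neg]
    by_cases h : mem (x-1)
    · rw [if_pos h, if_pos h]
    · rw [if_neg h, if_neg h]
  rw [h1]
  exact stepA_fwd (fun y => mem (-y)) F (-Rw) m' (-x) hm hleast hW hf

-- ---- pvRunTop facts ----
theorem pvRunTop_le (S : PySem.Set Int) (f : Nat) (t : Int) : t ≤ pvRunTop S f t := by
  induction f generalizing t with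
  | zero => rw [pvRunTop]
  | succ n ih =>
    rw [pvRunTop]
    by_cases h : PySem.Set.contains S (t+1) = true
    · rw [if_pos h]; have := ih (t+1); omega
    · rw [if_neg h]

theorem pvRunTop_mem (S : PySem.Set Int) (f : Nat) (t : Int) :
    ∀ x, t < x → x ≤ pvRunTop S f t → PySem.Set.contains S x = true := by
  induction f generalizing t with
  | zero => intro x h1 h2; rw [pvRunTop] at h2; omega
  | succ n ih =>
    intro x h1 h2
    rw [pvRunTop] at h2
    by_cases h : PySem.Set.contains S (t+1) = true
    · rw [if_pos h] at h2
      rcases eq_or_lt_of_le (show t + 1 ≤ x by omega) with heq | hlt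
      · rw [← heq]; exact h
      · exact ih (t+1) x hlt h2
    · rw [if_neg h] at h2; omega

theorem pvRunTop_exhaust (S : PySem.Set Int) (f : Nat) (t : Int)
    (h : PySem.Set.contains S (pvRunTop S f t + 1) = true) :
    ∀ x, t < x → x ≤ t + f + 1 → PySem.Set.contains S x = true := by
  induction f generalizing t with
  | zero =>
    intro x h1 h2
    rw [pvRunTop] at h
    have : x = t + 1 := by omega
    rw [this]; exact h
  | succ n ih =>
    intro x h1 h2
    by_cases hc : PySem.Set.contains S (t+1) = true
    · rw [pvRunTop, if_pos hc] at h
      rcases eq_or_lt_of_le (show t + 1 ≤ x by omega) with heq | hlt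
      · rw [← heq]; exact hc
      · exact ih (t+1) h x hlt (by push_cast at h2 ⊢; omega)
    · rw [pvRunTop, if_neg hc] at h
      exact absurd h hc

theorem pvRunTop_not_mem (S : PySem.Set Int) (hnd : S.Nodup) (t : Int) :
    PySem.Set.contains S (pvRunTop S S.length t + 1) = false := by
  cases hc : PySem.Set.contains S (pvRunTop S S.length t + 1) with
  | false => rfl
  | true =>
    exfalso
    have hall := pvRunTop_exhaust S S.length t hc
    have hsub : PySem.List.pyRange (t+1) (t + S.length + 2) 1 ⊆ S := by
      intro x hx
      rw [PySem.List.mem_pyRange_one] at hx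
      have hcx := hall x (by omega) (by omega)
      rw [PySem.Set.contains_iff] at hcx
      exact hcx
    have hnd' : (PySem.List.pyRange (t+1) (t + S.length + 2) 1).Nodup :=
      PySem.List.nodup_pyRange_one _ _
    have hlen := (List.subperm_of_subset hnd' hsub).length_le
    rw [PySem.List.length_pyRange_one] at hlen
    omega

-- ---- trajectory facts (hypotheses: m least member; runs (start,t1], [m,t2] with closed tops) ----
theorem ctx_step (mem : Int → Bool) (m start t1 t2 : Int)
    (hm : mem m = true)
    (h1 : start ≤ t1) (hrun1 : ∀ x, start < x → x ≤ t1 → mem x = true) (htop1 : mem (t1+1) = false)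
    (h2 : m ≤ t2) (hrun2 : ∀ x, m < x → x ≤ t2 → mem x = true) (htop2 : mem (t2+1) = false)
    (k : Int) (hk : 0 ≤ k) :
    gStep mem m (pvPosAt start (t1 - start) m (t2 - m + 1) k)
      = pvPosAt start (t1 - start) m (t2 - m + 1) (k+1) := by
  have hL : (0:Int) < t2 - m + 1 := by omega
  have hmod : ∀ a : Int, PySem.Int.mod a (t2 - m + 1) = a % (t2 - m + 1) :=
    fun a => PySem.Int.mod_eq_emod_of_pos hL
  by_cases hk1 : k + 1 ≤ t1 - start
  · have e1 : pvPosAt start (t1 - start) m (t2 - m + 1) k = start + k := by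
      unfold pvPosAt; rw [if_pos (by omega)]
    have e2 : pvPosAt start (t1 - start) m (t2 - m + 1) (k+1) = start + (k+1) := by
      unfold pvPosAt; rw [if_pos hk1]
    have hmem : mem (start + k + 1) = true := hrun1 (start + k + 1) (by omega) (by omega)
    rw [e1, e2]; unfold gStep; rw [if_pos hmem]
    omega
  · by_cases hk2 : k ≤ t1 - start
    · -- k = t1 - start : top of the start run, wrap to m
      have e1 : pvPosAt start (t1 - start) m (t2 - m + 1) k = start + k := by
        unfold pvPosAt; rw [if_pos hk2]
      have e2 : pvPosAt start (t1 - start) m (t2 - m + 1) (k+1) = m := by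
        unfold pvPosAt
        rw [if_neg (by omega), show k + 1 - (t1 - start) - 1 = 0 from by omega, hmod,
          Int.zero_emod, add_zero]
      have hmem : mem (start + k + 1) = false := by
        rw [show start + k + 1 = t1 + 1 from by omega]; exact htop1
      rw [e1, e2]; unfold gStep; rw [if_neg (by simp [hmem])]
    · -- inside the wrap cycle
      have hj0 : 0 ≤ (k - (t1 - start) - 1) % (t2 - m + 1) := Int.emod_nonneg _ (by omega)
      have hjL : (k - (t1 - start) - 1) % (t2 - m + 1) < t2 - m + 1 := Int.emod_lt_of_pos _ hL
      have e1 : pvPosAt start (t1 - start) m (t2 - m + 1) k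
          = m + (k - (t1 - start) - 1) % (t2 - m + 1) := by
        unfold pvPosAt; rw [if_neg hk2, hmod]
      have hsplit : (k + 1 - (t1 - start) - 1) % (t2 - m + 1)
          = ((k - (t1 - start) - 1) % (t2 - m + 1) + 1) % (t2 - m + 1) := by
        have hdm := Int.ediv_add_emod (k - (t1 - start) - 1) (t2 - m + 1)
        have key : k + 1 - (t1 - start) - 1
            = ((k - (t1 - start) - 1) % (t2 - m + 1) + 1)
              + (t2 - m + 1) * ((k - (t1 - start) - 1) / (t2 - m + 1)) := by linarith
        rw [key, Int.add_mul_emod_self_left]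
      have e2 : pvPosAt start (t1 - start) m (t2 - m + 1) (k+1)
          = m + ((k - (t1 - start) - 1) % (t2 - m + 1) + 1) % (t2 - m + 1) := by
        unfold pvPosAt; rw [if_neg (by omega), hmod, hsplit]
      rw [e1, e2]; unfold gStep
      by_cases hjtop : (k - (t1 - start) - 1) % (t2 - m + 1) + 1 < t2 - m + 1
      · have hmem : mem (m + (k - (t1 - start) - 1) % (t2 - m + 1) + 1) = true :=
          hrun2 _ (by omega) (by omega)
        rw [if_pos hmem, Int.emod_eq_of_lt (by omega) hjtop]
        omega
      · have hmem : mem (m + (k - (t1 - start) - 1) % (t2 - m + 1) + 1) = false := by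
          rw [show m + (k - (t1 - start) - 1) % (t2 - m + 1) + 1 = t2 + 1 from by omega]
          exact htop2
        rw [if_neg (by simp [hmem]),
          show (k - (t1 - start) - 1) % (t2 - m + 1) + 1 = t2 - m + 1 from by omega,
          Int.emod_self, add_zero]

theorem ctx_posAt_mem (mem : Int → Bool) (m start t1 t2 : Int)
    (hm : mem m = true)
    (h1 : start ≤ t1) (hrun1 : ∀ x, start < x → x ≤ t1 → mem x = true)
    (h2 : m ≤ t2) (hrun2 : ∀ x, m < x → x ≤ t2 → mem x = true)
    (k : Int) (hk : 1 ≤ k) :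
    mem (pvPosAt start (t1 - start) m (t2 - m + 1) k) = true := by
  have hL : (0:Int) < t2 - m + 1 := by omega
  unfold pvPosAt
  by_cases hk1 : k ≤ t1 - start
  · rw [if_pos hk1]; exact hrun1 _ (by omega) (by omega)
  · rw [if_neg hk1, PySem.Int.mod_eq_emod_of_pos hL]
    have hj0 : 0 ≤ (k - (t1 - start) - 1) % (t2 - m + 1) := Int.emod_nonneg _ (by omega)
    have hjL : (k - (t1 - start) - 1) % (t2 - m + 1) < t2 - m + 1 := Int.emod_lt_of_pos _ hL
    rcases eq_or_lt_of_le hj0 with heq | hlt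
    · rw [← heq, add_zero]; exact hm
    · exact hrun2 _ (by omega) (by omega)

theorem loopG_nowall (mem wall : Int → Bool) (m start t1 t2 : Int)
    (hm : mem m = true)
    (h1 : start ≤ t1) (hrun1 : ∀ x, start < x → x ≤ t1 → mem x = true) (htop1 : mem (t1+1) = false)
    (h2 : m ≤ t2) (hrun2 : ∀ x, m < x → x ≤ t2 → mem x = true) (htop2 : mem (t2+1) = false)
    (hnw : ∀ k, 1 ≤ k → wall (pvPosAt start (t1 - start) m (t2 - m + 1) k) = false) :
    ∀ (f : Nat) (k : Int), 0 ≤ k →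
      loopG mem wall m f (pvPosAt start (t1 - start) m (t2 - m + 1) k)
        = pvPosAt start (t1 - start) m (t2 - m + 1) (k + f) := by
  intro f
  induction f with
  | zero => intro k hk; rw [loopG]; norm_num
  | succ n ih =>
    intro k hk
    rw [loopG, ctx_step mem m start t1 t2 hm h1 hrun1 htop1 h2 hrun2 htop2 k hk,
      hnw (k+1) (by omega)]
    simp only [Bool.false_eq_true, if_false]
    rw [ih (k+1) (by omega)]
    congr 1
    push_cast
    omega

theorem loopG_wall (mem wall : Int → Bool) (m start t1 t2 : Int)
    (hm : mem m = true)
    (h1 : start ≤ t1) (hrun1 : ∀ x, start < x → x ≤ t1 → mem x = true) (htop1 : mem (t1+1) = false)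
    (h2 : m ≤ t2) (hrun2 : ∀ x, m < x → x ≤ t2 → mem x = true) (htop2 : mem (t2+1) = false)
    (w : Int) (hw1 : 1 ≤ w)
    (hwl : wall (pvPosAt start (t1 - start) m (t2 - m + 1) w) = true)
    (hmin : ∀ j, 1 ≤ j → j < w → wall (pvPosAt start (t1 - start) m (t2 - m + 1) j) = false) :
    ∀ (f : Nat) (k : Int), 0 ≤ k → k ≤ w - 1 →
      loopG mem wall m f (pvPosAt start (t1 - start) m (t2 - m + 1) k)
        = pvPosAt start (t1 - start) m (t2 - m + 1) (min (k + f) (w - 1)) := by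
  intro f
  induction f with
  | zero =>
    intro k hk hkw
    rw [loopG]
    congr 1
    push_cast
    omega
  | succ n ih =>
    intro k hk hkw
    rw [loopG, ctx_step mem m start t1 t2 hm h1 hrun1 htop1 h2 hrun2 htop2 k hk]
    by_cases hkend : k = w - 1
    · have hcond : wall (pvPosAt start (t1 - start) m (t2 - m + 1) (k+1)) = true := by
        rw [show k + 1 = w from by omega]; exact hwl
      rw [if_pos hcond]
      congr 1
      push_cast
      omega
    · rw [hmin (k+1) (by omega) (by omega)]
      simp only [Bool.false_eq_true, if_false]
      rw [ih (k+1) (by omega) (by omega)]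
      congr 1
      push_cast
      omega

-- ---- find? over pyRange ----
theorem find?_pyRange_none_spec (p : Int → Bool) (a b : Int)
    (h : (PySem.List.pyRange a b 1).find? p = none) :
    ∀ j, a ≤ j → j < b → p j = false := by
  intro j h1 h2
  have hj : j ∈ PySem.List.pyRange a b 1 := by
    rw [PySem.List.mem_pyRange_one]; exact ⟨h1, h2⟩
  simpa using List.find?_eq_none.mp h j hj

theorem find?_pyRange_some_spec (p : Int → Bool) (a b k : Int)
    (h : (PySem.List.pyRange a b 1).find? p = some k) :
    a ≤ k ∧ k < b ∧ p k = true ∧ ∀ j, a ≤ j → j < k → p j = false := by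
  have hk : p k = true := List.find?_some h
  have hkmem : k ∈ PySem.List.pyRange a b 1 := List.mem_of_find?_eq_some h
  rw [PySem.List.mem_pyRange_one] at hkmem
  refine ⟨hkmem.1, hkmem.2, hk, ?_⟩
  intro j hj1 hj2
  rcases List.find?_eq_some_iff_append.mp h with ⟨hpk, l1, l2, heq, hnone⟩
  have hjmem : j ∈ PySem.List.pyRange a b 1 := by
    rw [PySem.List.mem_pyRange_one]; exact ⟨hj1, by omega⟩
  have hpair : (PySem.List.pyRange a b 1).Pairwise (· < ·) :=
    PySem.List.pairwise_lt_pyRange_one _ _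
  rw [heq] at hjmem hpair
  rcases List.mem_append.mp hjmem with hja | hjb
  · simpa using hnone j hja
  · exfalso
    rcases List.mem_cons.mp hjb with rfl | hjbs
    · omega
    · have hcons := (List.pairwise_append.mp hpair).2.1
      have := (List.pairwise_cons.mp hcons).1 j hjbs
      omega

-- the minimum computed by B: a member, and least
theorem min_facts (lst : List Int) (memA : Int → Bool)
    (hmem : ∀ x, x ∈ lst ↔ memA x = true) (hne : lst ≠ []) :
    memA ((PySem.List.min? (PySem.Set.ofList lst) (fun x => x)).getD 0) = true ∧
    ∀ y, memA y = true → (PySem.List.min? (PySem.Set.ofList lst) (fun x => x)).getD 0 ≤ y := by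
  have hne' : PySem.Set.ofList lst ≠ [] := by
    obtain ⟨x, hx⟩ := List.exists_mem_of_ne_nil lst hne
    refine List.ne_nil_of_mem (a := x) ?_
    rw [PySem.Set.mem_ofList]; exact hx
  cases hmin : PySem.List.min? (PySem.Set.ofList lst) (fun x => x) with
  | none =>
    exfalso
    rw [PySem.List.min?_eq_none_iff] at hmin
    exact hne' hmin
  | some mv =>
    have hmv : mv ∈ PySem.Set.ofList lst := PySem.List.min?_mem hmin
    rw [PySem.Set.mem_ofList] at hmv
    constructor
    · simpa using (hmem mv).mp hmv
    · intro y hy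
      have hyl : y ∈ PySem.Set.ofList lst := by
        rw [PySem.Set.mem_ofList]; exact (hmem y).mpr hy
      simpa using PySem.List.min?_isMin hmin y hyl

theorem contains_eq_of_iff (l : List Int) (b : Int → Bool)
    (h : ∀ x, x ∈ l ↔ b x = true) :
    ∀ x, PySem.Set.contains (PySem.Set.ofList l) x = b x := by
  intro x
  cases hb : b x with
  | true =>
    have hxl : x ∈ PySem.Set.ofList l := by
      rw [PySem.Set.mem_ofList]; exact (h x).mpr hb
    rw [PySem.Set.contains_iff] ; exact hxl
  | false =>
    cases hc : PySem.Set.contains (PySem.Set.ofList l) x with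
    | false => rfl
    | true =>
      exfalso
      rw [PySem.Set.contains_iff, PySem.Set.mem_ofList] at hc
      have := (h x).mp hc
      rw [this] at hb
      exact Bool.noConfusion hb

-- core: B's per-line closed form equals A's abstract loop
theorem core_eq (lst wlst : List Int) (memA wallA : Int → Bool) (start i : Int)
    (hmem : ∀ x, x ∈ lst ↔ memA x = true)
    (hwl : ∀ x, x ∈ wlst ↔ (memA x && wallA x) = true)
    (hne : lst ≠ []) (hi : 1 ≤ i) :
    pvLineCalc (PySem.Set.ofList lst) (PySem.Set.ofList wlst) start i
      = loopG memA wallA ((PySem.List.min? (PySem.Set.ofList lst) (fun x => x)).getD 0) i.toNat start := by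
  obtain ⟨hm0, hleast0⟩ := min_facts lst memA hmem hne
  have hcont : ∀ x, PySem.Set.contains (PySem.Set.ofList lst) x = memA x :=
    contains_eq_of_iff lst memA hmem
  have hwcont : ∀ x, PySem.Set.contains (PySem.Set.ofList wlst) x = (memA x && wallA x) :=
    contains_eq_of_iff wlst _ hwl
  have hnd : (PySem.Set.ofList lst).Nodup := PySem.Set.nodup_ofList lst
  simp only [pvLineCalc]
  set S := PySem.Set.ofList lst with hS
  set m := (PySem.List.min? S (fun x => x)).getD 0 with hmdef
  set t1 := pvRunTop S S.length start with ht1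
  set t2 := pvRunTop S S.length m with ht2
  have h1 : start ≤ t1 := pvRunTop_le S S.length start
  have h2 : m ≤ t2 := pvRunTop_le S S.length m
  have hrun1 : ∀ x, start < x → x ≤ t1 → memA x = true := by
    intro x ha hb; rw [← hcont]; exact pvRunTop_mem S S.length start x ha hb
  have hrun2 : ∀ x, m < x → x ≤ t2 → memA x = true := by
    intro x ha hb; rw [← hcont]; exact pvRunTop_mem S S.length m x ha hb
  have htop1 : memA (t1+1) = false := by rw [← hcont]; exact pvRunTop_not_mem S hnd start
  have htop2 : memA (t2+1) = false := by rw [← hcont]; exact pvRunTop_not_mem S hnd m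
  have hwb : ∀ k, 1 ≤ k →
      PySem.Set.contains (PySem.Set.ofList wlst) (pvPosAt start (t1 - start) m (t2 - m + 1) k)
        = wallA (pvPosAt start (t1 - start) m (t2 - m + 1) k) := by
    intro k hk
    rw [hwcont, ctx_posAt_mem memA m start t1 t2 hm0 h1 hrun1 h2 hrun2 k hk, Bool.true_and]
  have hpos0 : pvPosAt start (t1 - start) m (t2 - m + 1) 0 = start := by
    unfold pvPosAt; rw [if_pos (by omega), add_zero]
  have hcast : (0:Int) + (i.toNat : Int) = i := by omega
  have hL : (0:Int) < t2 - m + 1 := by omega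
  cases hfind : (PySem.List.pyRange 1 ((t1 - start) + (t2 - m + 1) + 1) 1).find?
      (fun k => PySem.Set.contains (PySem.Set.ofList wlst) (pvPosAt start (t1 - start) m (t2 - m + 1) k)) with
  | none =>
    have hinr : ∀ j, 1 ≤ j → j < (t1 - start) + (t2 - m + 1) + 1 →
        PySem.Set.contains (PySem.Set.ofList wlst) (pvPosAt start (t1 - start) m (t2 - m + 1) j) = false :=
      fun j hj1 hj2 => find?_pyRange_none_spec _ _ _ hfind j hj1 hj2
    have hnw : ∀ k, 1 ≤ k → wallA (pvPosAt start (t1 - start) m (t2 - m + 1) k) = false := by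
      intro k hk
      by_cases hkp : k ≤ t1 - start
      · rw [← hwb k hk]; exact hinr k hk (by omega)
      · have hj0 : 0 ≤ (k - (t1 - start) - 1) % (t2 - m + 1) := Int.emod_nonneg _ (by omega)
        have hjL : (k - (t1 - start) - 1) % (t2 - m + 1) < t2 - m + 1 := Int.emod_lt_of_pos _ hL
        have hcyc : pvPosAt start (t1 - start) m (t2 - m + 1) k
            = pvPosAt start (t1 - start) m (t2 - m + 1)
                ((t1 - start) + 1 + (k - (t1 - start) - 1) % (t2 - m + 1)) := by
          unfold pvPosAt
          rw [if_neg (by omega), if_neg (by omega),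
            PySem.Int.mod_eq_emod_of_pos hL, PySem.Int.mod_eq_emod_of_pos hL,
            show (t1 - start) + 1 + (k - (t1 - start) - 1) % (t2 - m + 1) - (t1 - start) - 1
              = (k - (t1 - start) - 1) % (t2 - m + 1) from by ring,
            Int.emod_eq_of_lt hj0 hjL]
        rw [hcyc, ← hwb _ (by omega)]
        exact hinr _ (by omega) (by omega)
    have happ := loopG_nowall memA wallA m start t1 t2 hm0 h1 hrun1 htop1 h2 hrun2 htop2 hnw
      i.toNat 0 le_rfl
    rw [hpos0, hcast] at happ
    rw [happ]
  | some k0 =>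
    have hspec := find?_pyRange_some_spec
      (fun k => PySem.Set.contains (PySem.Set.ofList wlst) (pvPosAt start (t1 - start) m (t2 - m + 1) k))
      1 ((t1 - start) + (t2 - m + 1) + 1) k0 hfind
    obtain ⟨hk1, hk2, hkp', hkmin'⟩ := hspec
    have hkp : PySem.Set.contains (PySem.Set.ofList wlst)
        (pvPosAt start (t1 - start) m (t2 - m + 1) k0) = true := hkp'
    have hwall : wallA (pvPosAt start (t1 - start) m (t2 - m + 1) k0) = true := by
      rw [← hwb k0 hk1]; exact hkp
    have hmin' : ∀ j, 1 ≤ j → j < k0 → wallA (pvPosAt start (t1 - start) m (t2 - m + 1) j) = false := by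
      intro j hj1 hj2
      rw [← hwb j hj1]
      exact hkmin' j hj1 hj2
    have happ := loopG_wall memA wallA m start t1 t2 hm0 h1 hrun1 htop1 h2 hrun2 htop2
      k0 hk1 hwall hmin' i.toNat 0 le_rfl (by omega)
    rw [hpos0, hcast] at happ
    rw [happ]

-- ---- A's loop per direction (mem/wall kept abstract so both sides rewrite cleanly) ----
theorem aloop_d1 (G : List (Int × Int × String)) (R C c m : Int) (mem wall : Int → Bool)
    (hwall : ∀ y, wall y = decide (pvGet? G y c = some "#"))
    (hstep : ∀ x, pvScan (fun y => (pvGet? G y c).isSome) 1 (R.toNat+1)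
        (if (pvGet? G (x+1) c).isSome then x+1 else 0) = gStep mem m x) :
    ∀ (f : Nat) (x : Int), move1Loop G R C 1 f x c (x, c) = (loopG mem wall m f x, c) := by
  intro f
  induction f with
  | zero => intro x; rfl
  | succ n ih =>
    intro x
    rw [move1Loop, loopG]
    simp only [show ((1:Int) = 1) = True from eq_true rfl, if_true]
    rw [hstep x, hwall (gStep mem m x)]
    by_cases h : pvGet? G (gStep mem m x) c = some "#"
    · rw [if_pos h, decide_eq_true h]
      simp
    · rw [if_neg h, decide_eq_false h]
      simp only [Bool.false_eq_true, if_false]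
      exact ih _

theorem aloop_d3 (G : List (Int × Int × String)) (R C c m' : Int) (mem wall : Int → Bool)
    (hwall : ∀ y, wall y = decide (pvGet? G (-y) c = some "#"))
    (hstep : ∀ x, pvScan (fun y => (pvGet? G y c).isSome) (-1) (R.toNat+1)
        (if (pvGet? G (x-1) c).isSome then x-1 else R) = -(gStep mem m' (-x))) :
    ∀ (f : Nat) (x : Int), move1Loop G R C 3 f x c (x, c) = (-(loopG mem wall m' f (-x)), c) := by
  intro f
  induction f with
  | zero => intro x; simp [move1Loop, loopG]
  | succ n ih =>
    intro x
    rw [move1Loop, loopG]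
    simp only [show ((3:Int) = 1) = False from eq_false (by decide), if_false,
      show ((3:Int) = 3) = True from eq_true rfl, if_true]
    rw [hstep x, hwall (gStep mem m' (-x))]
    set y := gStep mem m' (-x) with hy
    by_cases h : pvGet? G (-y) c = some "#"
    · rw [if_pos h, decide_eq_true h]
      simp
    · rw [if_neg h, decide_eq_false h]
      simp only [Bool.false_eq_true, if_false]
      have := ih (-y)
      rw [this, neg_neg]

theorem aloop_d0 (G : List (Int × Int × String)) (R C r m : Int) (mem wall : Int → Bool)
    (hwall : ∀ y, wall y = decide (pvGet? G r y = some "#"))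
    (hstep : ∀ x, pvScan (fun y => (pvGet? G r y).isSome) 1 (C.toNat+1)
        (if (pvGet? G r (x+1)).isSome then x+1 else 0) = gStep mem m x) :
    ∀ (f : Nat) (x : Int), move1Loop G R C 0 f r x (r, x) = (r, loopG mem wall m f x) := by
  intro f
  induction f with
  | zero => intro x; rfl
  | succ n ih =>
    intro x
    rw [move1Loop, loopG]
    simp only [show ((0:Int) = 1) = False from eq_false (by decide), if_false,
      show ((0:Int) = 3) = False from eq_false (by decide),
      show ((0:Int) = 0) = True from eq_true rfl, if_true]
    rw [hstep x, hwall (gStep mem m x)]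
    by_cases h : pvGet? G r (gStep mem m x) = some "#"
    · rw [if_pos h, decide_eq_true h]
      simp
    · rw [if_neg h, decide_eq_false h]
      simp only [Bool.false_eq_true, if_false]
      exact ih _

theorem aloop_d2 (G : List (Int × Int × String)) (R C r m' : Int) (mem wall : Int → Bool)
    (hwall : ∀ y, wall y = decide (pvGet? G r (-y) = some "#"))
    (hstep : ∀ x, pvScan (fun y => (pvGet? G r y).isSome) (-1) (C.toNat+1)
        (if (pvGet? G r (x-1)).isSome then x-1 else C) = -(gStep mem m' (-x))) :
    ∀ (f : Nat) (x : Int), move1Loop G R C 2 f r x (r, x) = (r, -(loopG mem wall m' f (-x))) := by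
  intro f
  induction f with
  | zero => intro x; simp [move1Loop, loopG]
  | succ n ih =>
    intro x
    rw [move1Loop, loopG]
    simp only [show ((2:Int) = 1) = False from eq_false (by decide), if_false,
      show ((2:Int) = 3) = False from eq_false (by decide),
      show ((2:Int) = 0) = False from eq_false (by decide),
      show ((2:Int) = 2) = True from eq_true rfl, if_true]
    rw [hstep x, hwall (gStep mem m' (-x))]
    set y := gStep mem m' (-x) with hy
    by_cases h : pvGet? G r (-y) = some "#"
    · rw [if_pos h, decide_eq_true h]
      simp
    · rw [if_neg h, decide_eq_false h]
      simp only [Bool.false_eq_true, if_false]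
      have := ih (-y)
      rw [this, neg_neg]

theorem aloop_other (G : List (Int × Int × String)) (R C d : Int)
    (h0 : d ≠ 0) (h1 : d ≠ 1) (h2 : d ≠ 2) (h3 : d ≠ 3) :
    ∀ (f : Nat) (r c : Int) (pos : Int × Int), move1Loop G R C d f r c pos = pos := by
  intro f
  induction f with
  | zero => intro r c pos; rfl
  | succ n ih =>
    intro r c pos
    rw [move1Loop]
    simp only [if_neg h1, if_neg h3, if_neg h0, if_neg h2]
    exact ih r c pos

theorem case_d1 (G : List (Int × Int × String)) (R C r c i : Int) (hi : 1 ≤ i)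
    (hall : ∀ p ∈ G, p.2.1 = c → 0 ≤ p.1) (hexR : ∃ p ∈ G, p.2.1 = c ∧ p.1 ≤ R) :
    move1 G R C r c 1 i = move1_alt G R C r c 1 i := by
  have hmemiff : ∀ x, x ∈ ((G.filter (fun p => p.2.1 = c)).map (fun p => p.1 * 1)) ↔
      ((pvGet? G x c).isSome) = true := by
    intro x
    constructor
    · intro hx
      obtain ⟨p, hpf, hpx⟩ := List.mem_map.mp hx
      obtain ⟨hpG, hpc⟩ := List.mem_filter.mp hpf
      rw [pvGet?_isSome_iff]
      refine ⟨p, hpG, ?_, of_decide_eq_true hpc⟩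
      have h' : p.1 * 1 = x := hpx
      omega
    · intro hx
      rw [pvGet?_isSome_iff] at hx
      obtain ⟨p, hpG, hp1, hpc⟩ := hx
      exact List.mem_map.mpr ⟨p, List.mem_filter.mpr ⟨hpG, by simp [hpc]⟩,
        by show p.1 * 1 = x; omega⟩
  have hwliff : ∀ x, x ∈ ((G.filter (fun p => p.2.1 = c ∧ pvGet? G p.1 p.2.1 = some "#")).map (fun p => p.1 * 1)) ↔
      (((pvGet? G x c).isSome) && (decide (pvGet? G x c = some "#"))) = true := by
    intro x
    rw [Bool.and_eq_true]
    constructor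
    · intro hx
      obtain ⟨p, hpf, hpx⟩ := List.mem_map.mp hx
      obtain ⟨hpG, hpcond⟩ := List.mem_filter.mp hpf
      obtain ⟨hpc, hph⟩ := of_decide_eq_true hpcond
      have hp1 : p.1 = x := by have h' : p.1 * 1 = x := hpx; omega
      have hw : pvGet? G x c = some "#" := by rw [← hp1, ← hpc]; exact hph
      exact ⟨by rw [pvGet?_isSome_iff]; exact ⟨p, hpG, hp1, hpc⟩, decide_eq_true hw⟩
    · rintro ⟨hm, hw⟩
      rw [pvGet?_isSome_iff] at hm
      obtain ⟨p, hpG, hp1, hpc⟩ := hm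
      have hw' : pvGet? G x c = some "#" := of_decide_eq_true hw
      refine List.mem_map.mpr ⟨p, List.mem_filter.mpr ⟨hpG, ?_⟩,
        by show p.1 * 1 = x; omega⟩
      exact decide_eq_true ⟨hpc, by rw [hp1, hpc]; exact hw'⟩
  have hlstne : ((G.filter (fun p => p.2.1 = c)).map (fun p => p.1 * 1)) ≠ [] := by
    obtain ⟨p, hpG, hpc, _⟩ := hexR
    exact List.ne_nil_of_mem (List.mem_map.mpr ⟨p, List.mem_filter.mpr ⟨hpG, by simp [hpc]⟩, rfl⟩)
  obtain ⟨hm0, hleast0⟩ := min_facts ((G.filter (fun p => p.2.1 = c)).map (fun p => p.1 * 1))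
    (fun y => (pvGet? G y c).isSome) hmemiff hlstne
  have hb0 : 0 ≤ (PySem.List.min? (PySem.Set.ofList ((G.filter (fun p => p.2.1 = c)).map (fun p => p.1 * 1))) (fun x => x)).getD 0 ∧
      (PySem.List.min? (PySem.Set.ofList ((G.filter (fun p => p.2.1 = c)).map (fun p => p.1 * 1))) (fun x => x)).getD 0 ≤ R := by
    have hml := (hmemiff _).mpr hm0
    obtain ⟨p, hpf, hpx⟩ := List.mem_map.mp hml
    obtain ⟨hpG, hpc⟩ := List.mem_filter.mp hpf
    have h3 := hall p hpG (of_decide_eq_true hpc)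
    obtain ⟨q, hqG, hqc, hqR⟩ := hexR
    have hq := hleast0 _ ((hmemiff _).mp
      (List.mem_map.mpr ⟨q, List.mem_filter.mpr ⟨hqG, by simp [hqc]⟩, rfl⟩))
    have h' : p.1 * 1 = _ := hpx
    omega
  have hstep : ∀ x, pvScan (fun y => (pvGet? G y c).isSome) 1 (R.toNat+1)
      (if (pvGet? G (x+1) c).isSome then x+1 else 0)
      = gStep (fun y => (pvGet? G y c).isSome)
          ((PySem.List.min? (PySem.Set.ofList ((G.filter (fun p => p.2.1 = c)).map (fun p => p.1 * 1))) (fun x => x)).getD 0) x :=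
    fun x => stepA_fwd (fun y => (pvGet? G y c).isSome) (R.toNat+1) 0 _ x hm0 hleast0
      (by omega) (by omega)
  have hA : move1 G R C r c 1 i
      = (loopG (fun y => (pvGet? G y c).isSome) (fun y => decide (pvGet? G y c = some "#"))
          ((PySem.List.min? (PySem.Set.ofList ((G.filter (fun p => p.2.1 = c)).map (fun p => p.1 * 1))) (fun x => x)).getD 0) i.toNat r, c) := by
    unfold move1
    exact aloop_d1 G R C c _ (fun y => (pvGet? G y c).isSome)
      (fun y => decide (pvGet? G y c = some "#")) (fun y => rfl) hstep i.toNat r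
  have hBalt : move1_alt G R C r c 1 i
      = (pvLineCalc (PySem.Set.ofList ((G.filter (fun p => p.2.1 = c)).map (fun p => p.1 * 1)))
          (PySem.Set.ofList ((G.filter (fun p => p.2.1 = c ∧ pvGet? G p.1 p.2.1 = some "#")).map (fun p => p.1 * 1)))
          (r * 1) i * 1, c) := by
    unfold move1_alt
    rw [if_neg (show ¬(i ≤ 0 ∨ ((1:Int) ≠ 0 ∧ (1:Int) ≠ 1 ∧ (1:Int) ≠ 2 ∧ (1:Int) ≠ 3)) by
      rintro (h | h)
      · omega
      · exact h.2.1 rfl)]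
    norm_num
  rw [hA, hBalt,
    core_eq ((G.filter (fun p => p.2.1 = c)).map (fun p => p.1 * 1))
      ((G.filter (fun p => p.2.1 = c ∧ pvGet? G p.1 p.2.1 = some "#")).map (fun p => p.1 * 1))
      (fun y => (pvGet? G y c).isSome) (fun y => decide (pvGet? G y c = some "#"))
      (r * 1) i hmemiff hwliff hlstne hi]
  norm_num

theorem case_d3 (G : List (Int × Int × String)) (R C r c i : Int) (hi : 1 ≤ i)
    (hall : ∀ p ∈ G, p.2.1 = c → p.1 ≤ R) (hex0 : ∃ p ∈ G, p.2.1 = c ∧ 0 ≤ p.1) :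
    move1 G R C r c 3 i = move1_alt G R C r c 3 i := by
  have hR0 : 0 ≤ R := by
    obtain ⟨q, hqG, hqc, hq0⟩ := hex0
    have := hall q hqG hqc
    omega
  have hmemiff : ∀ x, x ∈ ((G.filter (fun p => p.2.1 = c)).map (fun p => p.1 * -1)) ↔
      ((pvGet? G (-x) c).isSome) = true := by
    intro x
    constructor
    · intro hx
      obtain ⟨p, hpf, hpx⟩ := List.mem_map.mp hx
      obtain ⟨hpG, hpc⟩ := List.mem_filter.mp hpf
      rw [pvGet?_isSome_iff]
      refine ⟨p, hpG, ?_, of_decide_eq_true hpc⟩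
      have h' : p.1 * -1 = x := hpx
      omega
    · intro hx
      rw [pvGet?_isSome_iff] at hx
      obtain ⟨p, hpG, hp1, hpc⟩ := hx
      exact List.mem_map.mpr ⟨p, List.mem_filter.mpr ⟨hpG, by simp [hpc]⟩,
        by show p.1 * -1 = x; omega⟩
  have hwliff : ∀ x, x ∈ ((G.filter (fun p => p.2.1 = c ∧ pvGet? G p.1 p.2.1 = some "#")).map (fun p => p.1 * -1)) ↔
      (((pvGet? G (-x) c).isSome) && (decide (pvGet? G (-x) c = some "#"))) = true := by
    intro x
    rw [Bool.and_eq_true]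
    constructor
    · intro hx
      obtain ⟨p, hpf, hpx⟩ := List.mem_map.mp hx
      obtain ⟨hpG, hpcond⟩ := List.mem_filter.mp hpf
      obtain ⟨hpc, hph⟩ := of_decide_eq_true hpcond
      have hp1 : p.1 = -x := by have h' : p.1 * -1 = x := hpx; omega
      have hw : pvGet? G (-x) c = some "#" := by rw [← hp1, ← hpc]; exact hph
      exact ⟨by rw [pvGet?_isSome_iff]; exact ⟨p, hpG, hp1, hpc⟩, decide_eq_true hw⟩
    · rintro ⟨hm, hw⟩
      rw [pvGet?_isSome_iff] at hm
      obtain ⟨p, hpG, hp1, hpc⟩ := hm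
      have hw' : pvGet? G (-x) c = some "#" := of_decide_eq_true hw
      refine List.mem_map.mpr ⟨p, List.mem_filter.mpr ⟨hpG, ?_⟩,
        by show p.1 * -1 = x; omega⟩
      exact decide_eq_true ⟨hpc, by rw [hp1, hpc]; exact hw'⟩
  have hlstne : ((G.filter (fun p => p.2.1 = c)).map (fun p => p.1 * -1)) ≠ [] := by
    obtain ⟨p, hpG, hpc, _⟩ := hex0
    exact List.ne_nil_of_mem (List.mem_map.mpr ⟨p, List.mem_filter.mpr ⟨hpG, by simp [hpc]⟩, rfl⟩)
  obtain ⟨hm0, hleast0⟩ := min_facts ((G.filter (fun p => p.2.1 = c)).map (fun p => p.1 * -1))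
    (fun y => (pvGet? G (-y) c).isSome) hmemiff hlstne
  have hb0 : -R ≤ (PySem.List.min? (PySem.Set.ofList ((G.filter (fun p => p.2.1 = c)).map (fun p => p.1 * -1))) (fun x => x)).getD 0 ∧
      (PySem.List.min? (PySem.Set.ofList ((G.filter (fun p => p.2.1 = c)).map (fun p => p.1 * -1))) (fun x => x)).getD 0 ≤ 0 := by
    have hml := (hmemiff _).mpr hm0
    obtain ⟨p, hpf, hpx⟩ := List.mem_map.mp hml
    obtain ⟨hpG, hpc⟩ := List.mem_filter.mp hpf
    have h3 := hall p hpG (of_decide_eq_true hpc)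
    obtain ⟨q, hqG, hqc, hq0⟩ := hex0
    have hq := hleast0 _ ((hmemiff _).mp
      (List.mem_map.mpr ⟨q, List.mem_filter.mpr ⟨hqG, by simp [hqc]⟩, rfl⟩))
    have h' : p.1 * -1 = _ := hpx
    omega
  have hstep : ∀ x, pvScan (fun y => (pvGet? G y c).isSome) (-1) (R.toNat+1)
      (if (pvGet? G (x-1) c).isSome then x-1 else R)
      = -(gStep (fun y => (pvGet? G (-y) c).isSome)
          ((PySem.List.min? (PySem.Set.ofList ((G.filter (fun p => p.2.1 = c)).map (fun p => p.1 * -1))) (fun x => x)).getD 0) (-x)) :=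
    fun x => stepA_bwd (fun y => (pvGet? G y c).isSome) (R.toNat+1) R _ x hm0 hleast0
      (by omega) (by omega)
  have hA : move1 G R C r c 3 i
      = (-(loopG (fun y => (pvGet? G (-y) c).isSome) (fun y => decide (pvGet? G (-y) c = some "#"))
          ((PySem.List.min? (PySem.Set.ofList ((G.filter (fun p => p.2.1 = c)).map (fun p => p.1 * -1))) (fun x => x)).getD 0) i.toNat (-r)), c) := by
    unfold move1
    exact aloop_d3 G R C c _ (fun y => (pvGet? G (-y) c).isSome)
      (fun y => decide (pvGet? G (-y) c = some "#")) (fun y => rfl) hstep i.toNat r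
  have hBalt : move1_alt G R C r c 3 i
      = (pvLineCalc (PySem.Set.ofList ((G.filter (fun p => p.2.1 = c)).map (fun p => p.1 * -1)))
          (PySem.Set.ofList ((G.filter (fun p => p.2.1 = c ∧ pvGet? G p.1 p.2.1 = some "#")).map (fun p => p.1 * -1)))
          (r * -1) i * -1, c) := by
    unfold move1_alt
    rw [if_neg (show ¬(i ≤ 0 ∨ ((3:Int) ≠ 0 ∧ (3:Int) ≠ 1 ∧ (3:Int) ≠ 2 ∧ (3:Int) ≠ 3)) by
      rintro (h | h)
      · omega
      · exact h.2.2.2 rfl)]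
    norm_num
  rw [hA, hBalt, show r * -1 = -r from by ring,
    core_eq ((G.filter (fun p => p.2.1 = c)).map (fun p => p.1 * -1))
      ((G.filter (fun p => p.2.1 = c ∧ pvGet? G p.1 p.2.1 = some "#")).map (fun p => p.1 * -1))
      (fun y => (pvGet? G (-y) c).isSome) (fun y => decide (pvGet? G (-y) c = some "#"))
      (-r) i hmemiff hwliff hlstne hi]
  simp [mul_neg_one]

theorem case_d0 (G : List (Int × Int × String)) (R C r c i : Int) (hi : 1 ≤ i)
    (hall : ∀ p ∈ G, p.1 = r → 0 ≤ p.2.1) (hexC : ∃ p ∈ G, p.1 = r ∧ p.2.1 ≤ C) :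
    move1 G R C r c 0 i = move1_alt G R C r c 0 i := by
  have hmemiff : ∀ x, x ∈ ((G.filter (fun p => p.1 = r)).map (fun p => p.2.1 * 1)) ↔
      ((pvGet? G r x).isSome) = true := by
    intro x
    constructor
    · intro hx
      obtain ⟨p, hpf, hpx⟩ := List.mem_map.mp hx
      obtain ⟨hpG, hpc⟩ := List.mem_filter.mp hpf
      rw [pvGet?_isSome_iff]
      refine ⟨p, hpG, of_decide_eq_true hpc, ?_⟩
      have h' : p.2.1 * 1 = x := hpx
      omega
    · intro hx
      rw [pvGet?_isSome_iff] at hx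
      obtain ⟨p, hpG, hpc, hp1⟩ := hx
      exact List.mem_map.mpr ⟨p, List.mem_filter.mpr ⟨hpG, by simp [hpc]⟩,
        by show p.2.1 * 1 = x; omega⟩
  have hwliff : ∀ x, x ∈ ((G.filter (fun p => p.1 = r ∧ pvGet? G p.1 p.2.1 = some "#")).map (fun p => p.2.1 * 1)) ↔
      (((pvGet? G r x).isSome) && (decide (pvGet? G r x = some "#"))) = true := by
    intro x
    rw [Bool.and_eq_true]
    constructor
    · intro hx
      obtain ⟨p, hpf, hpx⟩ := List.mem_map.mp hx
      obtain ⟨hpG, hpcond⟩ := List.mem_filter.mp hpf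
      obtain ⟨hpc, hph⟩ := of_decide_eq_true hpcond
      have hp1 : p.2.1 = x := by have h' : p.2.1 * 1 = x := hpx; omega
      have hw : pvGet? G r x = some "#" := by rw [← hpc, ← hp1]; exact hph
      exact ⟨by rw [pvGet?_isSome_iff]; exact ⟨p, hpG, hpc, hp1⟩, decide_eq_true hw⟩
    · rintro ⟨hm, hw⟩
      rw [pvGet?_isSome_iff] at hm
      obtain ⟨p, hpG, hpc, hp1⟩ := hm
      have hw' : pvGet? G r x = some "#" := of_decide_eq_true hw
      refine List.mem_map.mpr ⟨p, List.mem_filter.mpr ⟨hpG, ?_⟩,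
        by show p.2.1 * 1 = x; omega⟩
      exact decide_eq_true ⟨hpc, by rw [hpc, hp1]; exact hw'⟩
  have hlstne : ((G.filter (fun p => p.1 = r)).map (fun p => p.2.1 * 1)) ≠ [] := by
    obtain ⟨p, hpG, hpc, _⟩ := hexC
    exact List.ne_nil_of_mem (List.mem_map.mpr ⟨p, List.mem_filter.mpr ⟨hpG, by simp [hpc]⟩, rfl⟩)
  obtain ⟨hm0, hleast0⟩ := min_facts ((G.filter (fun p => p.1 = r)).map (fun p => p.2.1 * 1))
    (fun y => (pvGet? G r y).isSome) hmemiff hlstne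
  have hb0 : 0 ≤ (PySem.List.min? (PySem.Set.ofList ((G.filter (fun p => p.1 = r)).map (fun p => p.2.1 * 1))) (fun x => x)).getD 0 ∧
      (PySem.List.min? (PySem.Set.ofList ((G.filter (fun p => p.1 = r)).map (fun p => p.2.1 * 1))) (fun x => x)).getD 0 ≤ C := by
    have hml := (hmemiff _).mpr hm0
    obtain ⟨p, hpf, hpx⟩ := List.mem_map.mp hml
    obtain ⟨hpG, hpc⟩ := List.mem_filter.mp hpf
    have h3 := hall p hpG (of_decide_eq_true hpc)
    obtain ⟨q, hqG, hqc, hqC⟩ := hexC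
    have hq := hleast0 _ ((hmemiff _).mp
      (List.mem_map.mpr ⟨q, List.mem_filter.mpr ⟨hqG, by simp [hqc]⟩, rfl⟩))
    have h' : p.2.1 * 1 = _ := hpx
    omega
  have hstep : ∀ x, pvScan (fun y => (pvGet? G r y).isSome) 1 (C.toNat+1)
      (if (pvGet? G r (x+1)).isSome then x+1 else 0)
      = gStep (fun y => (pvGet? G r y).isSome)
          ((PySem.List.min? (PySem.Set.ofList ((G.filter (fun p => p.1 = r)).map (fun p => p.2.1 * 1))) (fun x => x)).getD 0) x :=
    fun x => stepA_fwd (fun y => (pvGet? G r y).isSome) (C.toNat+1) 0 _ x hm0 hleast0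
      (by omega) (by omega)
  have hA : move1 G R C r c 0 i
      = (r, loopG (fun y => (pvGet? G r y).isSome) (fun y => decide (pvGet? G r y = some "#"))
          ((PySem.List.min? (PySem.Set.ofList ((G.filter (fun p => p.1 = r)).map (fun p => p.2.1 * 1))) (fun x => x)).getD 0) i.toNat c) := by
    unfold move1
    exact aloop_d0 G R C r _ (fun y => (pvGet? G r y).isSome)
      (fun y => decide (pvGet? G r y = some "#")) (fun y => rfl) hstep i.toNat c
  have hBalt : move1_alt G R C r c 0 i
      = (r, pvLineCalc (PySem.Set.ofList ((G.filter (fun p => p.1 = r)).map (fun p => p.2.1 * 1)))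
          (PySem.Set.ofList ((G.filter (fun p => p.1 = r ∧ pvGet? G p.1 p.2.1 = some "#")).map (fun p => p.2.1 * 1)))
          (c * 1) i * 1) := by
    unfold move1_alt
    rw [if_neg (show ¬(i ≤ 0 ∨ ((0:Int) ≠ 0 ∧ (0:Int) ≠ 1 ∧ (0:Int) ≠ 2 ∧ (0:Int) ≠ 3)) by
      rintro (h | h)
      · omega
      · exact h.1 rfl)]
    norm_num
  rw [hA, hBalt,
    core_eq ((G.filter (fun p => p.1 = r)).map (fun p => p.2.1 * 1))
      ((G.filter (fun p => p.1 = r ∧ pvGet? G p.1 p.2.1 = some "#")).map (fun p => p.2.1 * 1))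
      (fun y => (pvGet? G r y).isSome) (fun y => decide (pvGet? G r y = some "#"))
      (c * 1) i hmemiff hwliff hlstne hi]
  norm_num

theorem case_d2 (G : List (Int × Int × String)) (R C r c i : Int) (hi : 1 ≤ i)
    (hall : ∀ p ∈ G, p.1 = r → p.2.1 ≤ C) (hex0 : ∃ p ∈ G, p.1 = r ∧ 0 ≤ p.2.1) :
    move1 G R C r c 2 i = move1_alt G R C r c 2 i := by
  have hC0 : 0 ≤ C := by
    obtain ⟨q, hqG, hqc, hq0⟩ := hex0
    have := hall q hqG hqc
    omega
  have hmemiff : ∀ x, x ∈ ((G.filter (fun p => p.1 = r)).map (fun p => p.2.1 * -1)) ↔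
      ((pvGet? G r (-x)).isSome) = true := by
    intro x
    constructor
    · intro hx
      obtain ⟨p, hpf, hpx⟩ := List.mem_map.mp hx
      obtain ⟨hpG, hpc⟩ := List.mem_filter.mp hpf
      rw [pvGet?_isSome_iff]
      refine ⟨p, hpG, of_decide_eq_true hpc, ?_⟩
      have h' : p.2.1 * -1 = x := hpx
      omega
    · intro hx
      rw [pvGet?_isSome_iff] at hx
      obtain ⟨p, hpG, hpc, hp1⟩ := hx
      exact List.mem_map.mpr ⟨p, List.mem_filter.mpr ⟨hpG, by simp [hpc]⟩,
        by show p.2.1 * -1 = x; omega⟩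
  have hwliff : ∀ x, x ∈ ((G.filter (fun p => p.1 = r ∧ pvGet? G p.1 p.2.1 = some "#")).map (fun p => p.2.1 * -1)) ↔
      (((pvGet? G r (-x)).isSome) && (decide (pvGet? G r (-x) = some "#"))) = true := by
    intro x
    rw [Bool.and_eq_true]
    constructor
    · intro hx
      obtain ⟨p, hpf, hpx⟩ := List.mem_map.mp hx
      obtain ⟨hpG, hpcond⟩ := List.mem_filter.mp hpf
      obtain ⟨hpc, hph⟩ := of_decide_eq_true hpcond
      have hp1 : p.2.1 = -x := by have h' : p.2.1 * -1 = x := hpx; omega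
      have hw : pvGet? G r (-x) = some "#" := by rw [← hpc, ← hp1]; exact hph
      exact ⟨by rw [pvGet?_isSome_iff]; exact ⟨p, hpG, hpc, hp1⟩, decide_eq_true hw⟩
    · rintro ⟨hm, hw⟩
      rw [pvGet?_isSome_iff] at hm
      obtain ⟨p, hpG, hpc, hp1⟩ := hm
      have hw' : pvGet? G r (-x) = some "#" := of_decide_eq_true hw
      refine List.mem_map.mpr ⟨p, List.mem_filter.mpr ⟨hpG, ?_⟩,
        by show p.2.1 * -1 = x; omega⟩
      exact decide_eq_true ⟨hpc, by rw [hpc, hp1]; exact hw'⟩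
  have hlstne : ((G.filter (fun p => p.1 = r)).map (fun p => p.2.1 * -1)) ≠ [] := by
    obtain ⟨p, hpG, hpc, _⟩ := hex0
    exact List.ne_nil_of_mem (List.mem_map.mpr ⟨p, List.mem_filter.mpr ⟨hpG, by simp [hpc]⟩, rfl⟩)
  obtain ⟨hm0, hleast0⟩ := min_facts ((G.filter (fun p => p.1 = r)).map (fun p => p.2.1 * -1))
    (fun y => (pvGet? G r (-y)).isSome) hmemiff hlstne
  have hb0 : -C ≤ (PySem.List.min? (PySem.Set.ofList ((G.filter (fun p => p.1 = r)).map (fun p => p.2.1 * -1))) (fun x => x)).getD 0 ∧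
      (PySem.List.min? (PySem.Set.ofList ((G.filter (fun p => p.1 = r)).map (fun p => p.2.1 * -1))) (fun x => x)).getD 0 ≤ 0 := by
    have hml := (hmemiff _).mpr hm0
    obtain ⟨p, hpf, hpx⟩ := List.mem_map.mp hml
    obtain ⟨hpG, hpc⟩ := List.mem_filter.mp hpf
    have h3 := hall p hpG (of_decide_eq_true hpc)
    obtain ⟨q, hqG, hqc, hq0⟩ := hex0
    have hq := hleast0 _ ((hmemiff _).mp
      (List.mem_map.mpr ⟨q, List.mem_filter.mpr ⟨hqG, by simp [hqc]⟩, rfl⟩))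
    have h' : p.2.1 * -1 = _ := hpx
    omega
  have hstep : ∀ x, pvScan (fun y => (pvGet? G r y).isSome) (-1) (C.toNat+1)
      (if (pvGet? G r (x-1)).isSome then x-1 else C)
      = -(gStep (fun y => (pvGet? G r (-y)).isSome)
          ((PySem.List.min? (PySem.Set.ofList ((G.filter (fun p => p.1 = r)).map (fun p => p.2.1 * -1))) (fun x => x)).getD 0) (-x)) :=
    fun x => stepA_bwd (fun y => (pvGet? G r y).isSome) (C.toNat+1) C _ x hm0 hleast0
      (by omega) (by omega)
  have hA : move1 G R C r c 2 i
      = (r, -(loopG (fun y => (pvGet? G r (-y)).isSome) (fun y => decide (pvGet? G r (-y) = some "#"))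
          ((PySem.List.min? (PySem.Set.ofList ((G.filter (fun p => p.1 = r)).map (fun p => p.2.1 * -1))) (fun x => x)).getD 0) i.toNat (-c))) := by
    unfold move1
    exact aloop_d2 G R C r _ (fun y => (pvGet? G r (-y)).isSome)
      (fun y => decide (pvGet? G r (-y) = some "#")) (fun y => rfl) hstep i.toNat c
  have hBalt : move1_alt G R C r c 2 i
      = (r, pvLineCalc (PySem.Set.ofList ((G.filter (fun p => p.1 = r)).map (fun p => p.2.1 * -1)))
          (PySem.Set.ofList ((G.filter (fun p => p.1 = r ∧ pvGet? G p.1 p.2.1 = some "#")).map (fun p => p.2.1 * -1)))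
          (c * -1) i * -1) := by
    unfold move1_alt
    rw [if_neg (show ¬(i ≤ 0 ∨ ((2:Int) ≠ 0 ∧ (2:Int) ≠ 1 ∧ (2:Int) ≠ 2 ∧ (2:Int) ≠ 3)) by
      rintro (h | h)
      · omega
      · exact h.2.2.1 rfl)]
    norm_num
  rw [hA, hBalt, show c * -1 = -c from by ring,
    core_eq ((G.filter (fun p => p.1 = r)).map (fun p => p.2.1 * -1))
      ((G.filter (fun p => p.1 = r ∧ pvGet? G p.1 p.2.1 = some "#")).map (fun p => p.2.1 * -1))
      (fun y => (pvGet? G r (-y)).isSome) (fun y => decide (pvGet? G r (-y) = some "#"))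
      (-c) i hmemiff hwliff hlstne hi]
  simp [mul_neg_one]

-- ===== VERDICT (by name: the statement is the Claim_ definition above) =====
theorem move1_spec : Claim_equal_move1 := by
  unfold Claim_equal_move1
  intro G R C r c d i _hdom hpre
  unfold Spec_move1
  by_cases hi : i ≤ 0
  · have h0 : i.toNat = 0 := by omega
    unfold move1 move1_alt
    rw [h0, if_pos (Or.inl hi)]
    rfl
  · have hi' : 1 ≤ i := by omega
    obtain ⟨hc1, hc3, hc0, hc2⟩ := hpre hi'
    by_cases h1 : d = 1
    · subst h1; obtain ⟨hall, hexR⟩ := hc1 rfl; exact case_d1 G R C r c i hi' hall hexR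
    · by_cases h3 : d = 3
      · subst h3; obtain ⟨hall, hex0⟩ := hc3 rfl; exact case_d3 G R C r c i hi' hall hex0
      · by_cases h0 : d = 0
        · subst h0; obtain ⟨hall, hexC⟩ := hc0 rfl; exact case_d0 G R C r c i hi' hall hexC
        · by_cases h2 : d = 2
          · subst h2; obtain ⟨hall, hex0⟩ := hc2 rfl; exact case_d2 G R C r c i hi' hall hex0
          · unfold move1 move1_alt
            rw [aloop_other G R C d h0 h1 h2 h3 i.toNat r c (r, c),
              if_pos (Or.inr ⟨h0, h1, h2, h3⟩)]
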